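-- pv_equiv track=rewrite | github.com/GinoLongobucco/SaaSGenius | models/advanced_prompt_engineering.py | _format_solution_overview
-- ===== SOURCE A (Python) =====
-- from typing import Dict, List, Any, Optional
--
-- def _format_solution_overview(features: List[str]) -> str:
--     """Formatea overview de la solución"""
--     if not features:
--         return "**Solución:** Plataforma SaaS integral para optimización de procesos empresariales."
--
--     # Agrupar features por categoría
--     categories = {
--         'Core': [],
--         'Analytics': [],
--         'Integration': [],
--         'Advanced': []
--     }
--
--     for feature in features:
--         feature_lower = feature.lower()
--         if any(term in feature_lower for term in ['dashboard', 'usuario', 'auth']):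
--             categories['Core'].append(feature)
--         elif any(term in feature_lower for term in ['analytic', 'report', 'metric']):
--             categories['Analytics'].append(feature)
--         elif any(term in feature_lower for term in ['api', 'integra', 'webhook']):
--             categories['Integration'].append(feature)
--         else:
--             categories['Advanced'].append(feature)
--
--     solution_parts = []
--     for category, items in categories.items():
--         if items:
--             solution_parts.append(f"**{category}:** {', '.join(items)}")
--
--     return '\n'.join(solution_parts) if solution_parts else "**Solución:** Plataforma SaaS personalizada."
-- ===== SOURCE B (Python) =====
-- # B: data-driven rules table, category-major grouping (one filter pass per category)
-- # instead of A's feature-major if/elif cascade appending into a dict.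
-- RULES = [
--     ("Core", ("dashboard", "usuario", "auth")),
--     ("Analytics", ("analytic", "report", "metric")),
--     ("Integration", ("api", "integra", "webhook")),
--     ("Advanced", ()),
-- ]
--
-- def _categorize(feature):
--     fl = feature.lower()
--     return next((i for i, (_, terms) in enumerate(RULES)
--                  if any(t in fl for t in terms)), 3)
--
-- def _format_solution_overview(features):
--     if not features:
--         return "**Solución:** Plataforma SaaS integral para optimización de procesos empresariales."
--     lines = []
--     for i, (name, _) in enumerate(RULES):
--         items = [f for f in features if _categorize(f) == i]
--         if items:
--             lines.append(f"**{name}:** {', '.join(items)}")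
--     return "\n".join(lines)
-- ===== Notes on version B (the rewrite author's own statement) =====
-- stated objective: idiomatic
-- what changed: Replaces the feature-major if/elif cascade that appends into a pre-seeded dict with an ordered rules table: a first-match categorizer over the table and a category-major pass that filters the features per category and emits the non-empty lines.
import Mathlib
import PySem

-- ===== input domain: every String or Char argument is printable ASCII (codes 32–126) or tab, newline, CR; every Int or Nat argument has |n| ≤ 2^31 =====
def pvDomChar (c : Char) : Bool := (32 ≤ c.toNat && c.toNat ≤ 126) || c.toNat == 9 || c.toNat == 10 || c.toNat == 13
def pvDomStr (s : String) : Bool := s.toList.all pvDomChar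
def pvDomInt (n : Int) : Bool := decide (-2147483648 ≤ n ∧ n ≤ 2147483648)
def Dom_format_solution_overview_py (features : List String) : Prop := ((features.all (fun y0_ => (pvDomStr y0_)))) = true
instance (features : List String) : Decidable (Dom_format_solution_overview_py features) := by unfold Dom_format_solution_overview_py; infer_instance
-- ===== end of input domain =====

-- B replaces A's feature-major if/elif cascade appending into a pre-seeded dict by an
-- ordered rules table with a first-match categorizer and a category-major filter pass.


-- the f-string "**{category}:** {', '.join(items)}" (both Pythons contain it verbatim)
def pvLine (cat : String) (items : List String) : String :=
  PySem.Str.join "" ["**", cat, ":** ", PySem.Str.join ", " items]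

-- ===== PORT A =====
-- the body of A's 'for feature in features' loop (if/elif cascade appending into the dict)
def pvStepA (d : PySem.Dict String (List String)) (feature : String) : PySem.Dict String (List String) :=
  let feature_lower := PySem.Str.lower feature
  if ["dashboard", "usuario", "auth"].any (fun t => PySem.Str.isIn t feature_lower) then
    d.modify "Core" [] (fun xs => xs ++ [feature])
  else if ["analytic", "report", "metric"].any (fun t => PySem.Str.isIn t feature_lower) then
    d.modify "Analytics" [] (fun xs => xs ++ [feature])
  else if ["api", "integra", "webhook"].any (fun t => PySem.Str.isIn t feature_lower) then
    d.modify "Integration" [] (fun xs => xs ++ [feature])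
  else
    d.modify "Advanced" [] (fun xs => xs ++ [feature])

def format_solution_overview_py (features : List String) : String :=
  if features = [] then
    "**Solución:** Plataforma SaaS integral para optimización de procesos empresariales."
  else
    let categories := features.foldl pvStepA
      (PySem.Dict.ofList [("Core", []), ("Analytics", []), ("Integration", []), ("Advanced", [])])
    let solution_parts := categories.items.foldl (fun acc ci =>
      if ci.2 ≠ [] then acc ++ [pvLine ci.1 ci.2] else acc) []
    if solution_parts ≠ [] then PySem.Str.join "\n" solution_parts
    else "**Solución:** Plataforma SaaS personalizada."

-- ===== PORT B =====
def pvRules : List (String × List String) :=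
  [("Core", ["dashboard", "usuario", "auth"]),
   ("Analytics", ["analytic", "report", "metric"]),
   ("Integration", ["api", "integra", "webhook"]),
   ("Advanced", [])]

-- first index of a rule one of whose terms occurs in the lowercased feature, else 3
def pvCategorize (feature : String) : Nat :=
  let fl := PySem.Str.lower feature
  (pvRules.findIdx? (fun r => r.2.any (fun t => PySem.Str.isIn t fl))).getD 3

def format_solution_overview_py_alt (features : List String) : String :=
  if features = [] then
    "**Solución:** Plataforma SaaS integral para optimización de procesos empresariales."
  else
    let lines := (PySem.List.enumerate pvRules).foldl (fun acc r =>
      let items := features.filter (fun f => (pvCategorize f : Int) == r.1)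
      if items ≠ [] then acc ++ [pvLine r.2.1 items] else acc) []
    PySem.Str.join "\n" lines

-- ===== PRECONDITION & SPEC =====
def Spec_format_solution_overview_py (features : List String) (out : String) : Prop := out = format_solution_overview_py_alt features
instance (features : List String) (out : String) : Decidable (Spec_format_solution_overview_py features out) := by unfold Spec_format_solution_overview_py; infer_instance

-- ===== CLAIM (what is proved, stated in full; the proofs are below) =====
def Claim_equal_format_solution_overview_py : Prop := ∀ (features : List String), Dom_format_solution_overview_py features → Spec_format_solution_overview_py features (format_solution_overview_py features)

-- ===== LEMMAS AND PROOFS =====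

-- B's table-driven categorizer, unfolded into branch form
lemma pvCategorize_eq (f : String) :
    pvCategorize f =
      if ["dashboard", "usuario", "auth"].any (fun t => PySem.Str.isIn t (PySem.Str.lower f)) then 0
      else if ["analytic", "report", "metric"].any (fun t => PySem.Str.isIn t (PySem.Str.lower f)) then 1
      else if ["api", "integra", "webhook"].any (fun t => PySem.Str.isIn t (PySem.Str.lower f)) then 2
      else 3 := by
  simp only [pvCategorize, pvRules, List.findIdx?, List.findIdx?.go]
  simp only [List.any_cons, List.any_nil, Bool.or_false]
  split_ifs <;> simp_all

lemma pvCategorize_le (f : String) : pvCategorize f ≤ 3 := by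
  rw [pvCategorize_eq]; split_ifs <;> omega

-- A's cascade step sends the feature to the list of its pvCategorize category
lemma stepA_eq (c a i v : List String) (f : String) :
    pvStepA (PySem.Dict.mk [("Core", c), ("Analytics", a), ("Integration", i), ("Advanced", v)]) f
    = if pvCategorize f = 0 then PySem.Dict.mk [("Core", c ++ [f]), ("Analytics", a), ("Integration", i), ("Advanced", v)]
      else if pvCategorize f = 1 then PySem.Dict.mk [("Core", c), ("Analytics", a ++ [f]), ("Integration", i), ("Advanced", v)]
      else if pvCategorize f = 2 then PySem.Dict.mk [("Core", c), ("Analytics", a), ("Integration", i ++ [f]), ("Advanced", v)]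
      else PySem.Dict.mk [("Core", c), ("Analytics", a), ("Integration", i), ("Advanced", v ++ [f])] := by
  rw [pvCategorize_eq]
  unfold pvStepA
  split_ifs <;> simp_all [PySem.Dict.modify, PySem.Dict.insert, PySem.Dict.getD, PySem.Dict.get?, PySem.Dict.contains]

-- A's grouping loop computes exactly B's per-category filters
lemma loopA_eq (fs : List String) (c a i v : List String) :
    fs.foldl pvStepA (PySem.Dict.mk [("Core", c), ("Analytics", a), ("Integration", i), ("Advanced", v)])
    = PySem.Dict.mk [("Core", c ++ fs.filter (fun f => pvCategorize f = 0)),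
                     ("Analytics", a ++ fs.filter (fun f => pvCategorize f = 1)),
                     ("Integration", i ++ fs.filter (fun f => pvCategorize f = 2)),
                     ("Advanced", v ++ fs.filter (fun f => pvCategorize f = 3))] := by
  induction fs generalizing c a i v with
  | nil => simp
  | cons f fs ih =>
    rw [List.foldl_cons, stepA_eq]
    by_cases hc0 : pvCategorize f = 0 <;> by_cases hc1 : pvCategorize f = 1 <;>
      by_cases hc2 : pvCategorize f = 2 <;> by_cases hc3 : pvCategorize f = 3 <;>
        first
        | omega
        | (have := pvCategorize_le f; omega)
        | simp [hc0, hc1, hc2, hc3, ih, List.append_assoc]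

-- B's Int-indexed membership tests are the Nat-indexed ones
lemma pvFilt0 (x : String) : ((pvCategorize x : Int) == 0) = decide (pvCategorize x = 0) := by
  simp [beq_eq_decide]
lemma pvFilt1 (x : String) : ((pvCategorize x : Int) == 1) = decide (pvCategorize x = 1) := by
  simp [beq_eq_decide]
lemma pvFilt2 (x : String) : ((pvCategorize x : Int) == 2) = decide (pvCategorize x = 2) := by
  simp [beq_eq_decide]
  omega
lemma pvFilt3 (x : String) : ((pvCategorize x : Int) == 3) = decide (pvCategorize x = 3) := by
  simp [beq_eq_decide]
  omega

set_option maxHeartbeats 1000000 in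
theorem format_solution_overview_py_spec : Claim_equal_format_solution_overview_py := by
  unfold Claim_equal_format_solution_overview_py
  intro features _
  unfold Spec_format_solution_overview_py
  by_cases hE : features = []
  · simp [format_solution_overview_py, format_solution_overview_py_alt, hE]
  · simp only [format_solution_overview_py, format_solution_overview_py_alt, if_neg hE]
    rw [show PySem.Dict.ofList [("Core", ([] : List String)), ("Analytics", []), ("Integration", []), ("Advanced", [])]
          = PySem.Dict.mk [("Core", []), ("Analytics", []), ("Integration", []), ("Advanced", [])] from rfl]
    rw [loopA_eq features [] [] [] []]
    simp only [pvRules, PySem.List.enumerate_cons, PySem.List.enumerate_nil]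
    simp only [List.foldl_cons, List.foldl_nil]
    norm_num [pvFilt0, pvFilt1, pvFilt2, pvFilt3]
    by_cases e0 : ∃ x ∈ features, pvCategorize x = 0 <;>
      by_cases e1 : ∃ x ∈ features, pvCategorize x = 1 <;>
        by_cases e2 : ∃ x ∈ features, pvCategorize x = 2 <;>
          by_cases e3 : ∃ x ∈ features, pvCategorize x = 3 <;>
            first
            | (exfalso
               obtain ⟨f, fs, rfl⟩ := List.exists_cons_of_ne_nil hE
               have hle := pvCategorize_le f
               have hm : f ∈ f :: fs := List.mem_cons_self
               have hc : pvCategorize f = 0 ∨ pvCategorize f = 1 ∨ pvCategorize f = 2 ∨ pvCategorize f = 3 := by omega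
               rcases hc with h | h | h | h <;>
                 first | exact e0 ⟨f, hm, h⟩ | exact e1 ⟨f, hm, h⟩ | exact e2 ⟨f, hm, h⟩ | exact e3 ⟨f, hm, h⟩)
            | simp [e0, e1, e2, e3]

-- ===== VERDICT kept at the bottom by name =====
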